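-- pv_equiv track=rewrite | github.com/sokkos1995/ai-challenge-01 | homeworks/src/day_20_orchestration.py | build_tool_registry
-- ===== SOURCE A (Python) =====
-- def build_tool_registry(server_tools: dict[str, list[str]]) -> dict[str, str]:
--     registry: dict[str, str] = {}
--     duplicates: list[str] = []
--     for server_id, tools in server_tools.items():
--         for tool_name in tools:
--             if tool_name in registry and registry[tool_name] != server_id:
--                 duplicates.append(tool_name)
--                 continue
--             registry[tool_name] = server_id
--     if duplicates:
--         dup_display = ", ".join(sorted(set(duplicates)))
--         raise RuntimeError(f"Duplicate tool names across servers: {dup_display}")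
--     return registry
-- ===== SOURCE B (Python) =====
-- def build_tool_registry(server_tools: dict[str, list[str]]) -> dict[str, str]:
--     index: dict[str, set[str]] = {}
--     for server_id, tools in server_tools.items():
--         for tool_name in tools:
--             index.setdefault(tool_name, set()).add(server_id)
--     duplicates = sorted(t for t, servers in index.items() if len(servers) > 1)
--     if duplicates:
--         raise RuntimeError(f"Duplicate tool names across servers: {', '.join(duplicates)}")
--     return {tool: min(servers) for tool, servers in index.items()}
-- ===== Notes on version B (the rewrite author's own statement) =====
-- stated objective: alternative
-- what changed: B replaces A's incremental conditional registry pass by a tool->set-of-servers index built first, then a separate duplicate scan and a final registry projection (two differently-shaped passes over a different data structure).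
import Mathlib
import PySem

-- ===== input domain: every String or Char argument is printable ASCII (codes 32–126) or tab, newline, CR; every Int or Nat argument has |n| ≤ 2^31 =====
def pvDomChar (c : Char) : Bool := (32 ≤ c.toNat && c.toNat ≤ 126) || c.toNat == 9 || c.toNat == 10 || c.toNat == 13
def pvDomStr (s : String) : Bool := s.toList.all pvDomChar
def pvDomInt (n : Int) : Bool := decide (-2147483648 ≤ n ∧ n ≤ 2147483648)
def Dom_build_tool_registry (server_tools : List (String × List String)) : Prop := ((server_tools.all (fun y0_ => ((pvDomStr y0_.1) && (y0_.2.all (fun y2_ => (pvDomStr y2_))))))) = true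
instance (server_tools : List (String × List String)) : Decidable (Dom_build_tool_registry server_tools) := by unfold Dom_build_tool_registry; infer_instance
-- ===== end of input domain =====

-- B builds a tool→set-of-servers index first, then scans it for duplicates and projects the
-- registry from it, instead of A's single incremental conditional pass (objective: alternative).

-- ===== PORT A =====
-- A's nested loop: state = (registry, duplicates); the raise branch is outside Pre_ (returns []).
def build_tool_registry (server_tools : List (String × List String)) : List (String × String) :=
  let st : PySem.Dict String String × List String :=
    server_tools.foldl (fun st p =>
      p.2.foldl (fun st tool_name =>
        match st.1.get? tool_name with
        | some v => if v ≠ p.1 then (st.1, st.2 ++ [tool_name])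
                    else (st.1.insert tool_name p.1, st.2)
        | none => (st.1.insert tool_name p.1, st.2)) st) (PySem.Dict.empty, [])
  if st.2 ≠ [] then []  -- raise RuntimeError (unreached under Pre_)
  else st.1.items

-- ===== PORT B =====
-- B: index[tool] = set of servers; duplicates = sorted tools with >1 server; registry = tool ↦ min(servers).
def build_tool_registry_alt (server_tools : List (String × List String)) : List (String × String) :=
  let index : PySem.Dict String (PySem.Set String) :=
    server_tools.foldl (fun idx p =>
      p.2.foldl (fun idx tool_name =>
        idx.modify tool_name PySem.Set.empty (fun s => PySem.Set.add s p.1)) idx) PySem.Dict.empty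
  let duplicates :=
    PySem.List.sorted ((index.items.filter (fun q => decide (1 < q.2.length))).map (·.1)) (fun x => x) false
  if duplicates ≠ [] then []  -- raise RuntimeError (unreached under Pre_)
  else index.items.map (fun q => (q.1, (PySem.List.min? q.2 (fun x => x)).getD ""))

-- ===== PRECONDITION & SPEC =====
-- Pre_ excludes exactly the inputs where some tool appears under two distinct server ids: there A
-- raises RuntimeError (and so does B).
def Pre_build_tool_registry (server_tools : List (String × List String)) : Prop :=
  ∀ p1 ∈ server_tools, ∀ p2 ∈ server_tools, ∀ t ∈ p1.2, t ∈ p2.2 → p1.1 = p2.1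
instance (server_tools : List (String × List String)) : Decidable (Pre_build_tool_registry server_tools) := by unfold Pre_build_tool_registry; infer_instance

def pvWitness_build_tool_registry : (List (String × List String)) :=
  [("s1", ["alpha", "beta", "alpha"]), ("s2", ["gamma"]), ("s3", [])]

def Spec_build_tool_registry (server_tools : List (String × List String)) (out : List (String × String)) : Prop := out = build_tool_registry_alt server_tools
instance (server_tools : List (String × List String)) (out : List (String × String)) : Decidable (Spec_build_tool_registry server_tools out) := by unfold Spec_build_tool_registry; infer_instance

-- ===== CLAIM (what is proved, stated in full; the proofs are below) =====
def Claim_equal_build_tool_registry : Prop := ∀ (server_tools : List (String × List String)), Dom_build_tool_registry server_tools → Pre_build_tool_registry server_tools → Spec_build_tool_registry server_tools (build_tool_registry server_tools)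

-- ===== LEMMAS AND PROOFS =====

-- inserting the value a key already has leaves the items unchanged
theorem pv_items_insert_same {κ ν : Type} [BEq κ] [LawfulBEq κ] (d : PySem.Dict κ ν) (k : κ) (v : ν)
    (hn : d.keys.Nodup) (h : d.get? k = some v) : (d.insert k v).items = d.items := by
  have hc : d.contains k = true := by rw [PySem.Dict.contains_eq_isSome_get?, h]; rfl
  rw [PySem.Dict.items_insert_of_contains d v hc]
  have this1 : ∀ p ∈ d.items, (if (p.1 == k) = true then (k, v) else p) = p := by
    intro p hp
    obtain ⟨a, b⟩ := p
    by_cases hk : a = k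
    · subst hk
      have h2 : d.get? a = some b := PySem.Dict.get?_of_mem_items d hp hn
      rw [h] at h2
      simp [Option.some.inj h2]
    · simp [hk]
  exact (List.map_congr_left this1).trans (List.map_id' _)

-- the loop invariant tying A's registry to B's index through both inner loops
theorem pv_inner (L : List (String × List String)) (hPre : Pre_build_tool_registry L)
    (server : String) (ts0 : List String) (hmemL : (server, ts0) ∈ L) :
    ∀ (tools : List String), (∀ t ∈ tools, t ∈ ts0) →
    ∀ (reg : PySem.Dict String String) (dups : List String) (idx : PySem.Dict String (PySem.Set String)),
    reg.keys.Nodup →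
    idx.items = reg.items.map (fun p => (p.1, ([p.2] : PySem.Set String))) →
    (∀ q ∈ reg.items, ∃ ts, (q.2, ts) ∈ L ∧ q.1 ∈ ts) →
    ((tools.foldl (fun st tool_name =>
        match st.1.get? tool_name with
        | some v => if v ≠ server then (st.1, st.2 ++ [tool_name])
                    else (st.1.insert tool_name server, st.2)
        | none => (st.1.insert tool_name server, st.2)) (reg, dups)).2 = dups ∧
     (tools.foldl (fun st tool_name =>
        match st.1.get? tool_name with
        | some v => if v ≠ server then (st.1, st.2 ++ [tool_name])
                    else (st.1.insert tool_name server, st.2)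
        | none => (st.1.insert tool_name server, st.2)) (reg, dups)).1.keys.Nodup ∧
     (tools.foldl (fun idx tool_name =>
        idx.modify tool_name PySem.Set.empty (fun s => PySem.Set.add s server)) idx).items =
       (tools.foldl (fun st tool_name =>
        match st.1.get? tool_name with
        | some v => if v ≠ server then (st.1, st.2 ++ [tool_name])
                    else (st.1.insert tool_name server, st.2)
        | none => (st.1.insert tool_name server, st.2)) (reg, dups)).1.items.map (fun p => (p.1, ([p.2] : PySem.Set String))) ∧
     (∀ q ∈ (tools.foldl (fun st tool_name =>
        match st.1.get? tool_name with
        | some v => if v ≠ server then (st.1, st.2 ++ [tool_name])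
                    else (st.1.insert tool_name server, st.2)
        | none => (st.1.insert tool_name server, st.2)) (reg, dups)).1.items, ∃ ts, (q.2, ts) ∈ L ∧ q.1 ∈ ts)) := by
  intro tools
  induction tools with
  | nil => intro _ reg dups idx hn hidx hR; exact ⟨rfl, hn, hidx.symm ▸ rfl, hR⟩
  | cons t rest ih =>
    intro hsub reg dups idx hn hidx hR
    have hkeys : idx.keys = reg.keys := by
      simp only [PySem.Dict.keys, hidx, List.map_map]; rfl
    have hidxn : idx.keys.Nodup := by rw [hkeys]; exact hn
    cases hget : reg.get? t with
    | none =>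
      have hc : reg.contains t = false := (PySem.Dict.get?_eq_none_iff_contains reg t).mp hget
      have hic : idx.contains t = false := by
        rw [PySem.Dict.contains_eq_decide_mem_keys, hkeys,
          ← PySem.Dict.contains_eq_decide_mem_keys, hc]
      have hstep : (PySem.Dict.modify idx t PySem.Set.empty (fun s => PySem.Set.add s server)).items
          = (reg.insert t server).items.map (fun p => (p.1, ([p.2] : PySem.Set String))) := by
        show (idx.insert t (PySem.Set.add (idx.getD t PySem.Set.empty) server)).items = _
        rw [PySem.Dict.getD_of_not_contains idx _ hic,
          PySem.Dict.items_insert_of_not_contains idx _ hic,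
          PySem.Dict.items_insert_of_not_contains reg _ hc, hidx, List.map_append]
        rfl
      simp only [List.foldl_cons, hget]
      exact ih (fun x hx => hsub x (List.mem_cons_of_mem _ hx))
        (reg.insert t server) dups _ (PySem.Dict.nodup_keys_insert reg t server hn) hstep
        (by
          intro q hq
          rw [PySem.Dict.items_insert_of_not_contains reg _ hc, List.mem_append] at hq
          rcases hq with hq | hq
          · exact hR q hq
          · simp only [List.mem_singleton] at hq
            exact ⟨ts0, by rw [hq]; exact hmemL, by rw [hq]; exact hsub t List.mem_cons_self⟩)
    | some v =>
      have hmem : (t, v) ∈ reg.items := PySem.Dict.mem_items_of_get?_eq_some reg hget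
      obtain ⟨ts, hts, htm⟩ := hR (t, v) hmem
      have hv : v = server := (hPre (v, ts) hts (server, ts0) hmemL t htm (hsub t List.mem_cons_self))
      subst hv
      have hA : (reg.insert t v).items = reg.items := pv_items_insert_same reg t v hn hget
      have hAk : (reg.insert t v).keys = reg.keys := by simp only [PySem.Dict.keys, hA]
      have himem : (t, ([v] : PySem.Set String)) ∈ idx.items := by
        rw [hidx]; exact List.mem_map.mpr ⟨(t, v), hmem, rfl⟩
      have higet : idx.get? t = some ([v] : PySem.Set String) :=
        PySem.Dict.get?_of_mem_items idx himem hidxn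
      have hB : (PySem.Dict.modify idx t PySem.Set.empty (fun s => PySem.Set.add s v)).items = idx.items := by
        show (idx.insert t (PySem.Set.add (idx.getD t PySem.Set.empty) v)).items = _
        rw [PySem.Dict.getD_of_mem_items idx himem hidxn,
          PySem.Set.add_of_mem (List.mem_singleton.mpr rfl)]
        exact pv_items_insert_same idx t _ hidxn higet
      simp only [List.foldl_cons, hget, ne_eq, not_true_eq_false, if_false]
      have hstep2 := ih (fun x hx => hsub x (List.mem_cons_of_mem _ hx))
        (reg.insert t v) dups (PySem.Dict.modify idx t PySem.Set.empty (fun s => PySem.Set.add s v))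
        (by rw [show (reg.insert t v).keys.Nodup ↔ reg.keys.Nodup by rw [hAk]]; exact hn)
        (by rw [hB, hidx, hA]) (by rw [hA]; exact hR)
      exact hstep2

-- the same invariant through the outer loop
theorem pv_outer (L : List (String × List String)) (hPre : Pre_build_tool_registry L) :
    ∀ (l : List (String × List String)), (∀ p ∈ l, p ∈ L) →
    ∀ (reg : PySem.Dict String String) (dups : List String) (idx : PySem.Dict String (PySem.Set String)),
    reg.keys.Nodup →
    idx.items = reg.items.map (fun p => (p.1, ([p.2] : PySem.Set String))) →
    (∀ q ∈ reg.items, ∃ ts, (q.2, ts) ∈ L ∧ q.1 ∈ ts) →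
    ((l.foldl (fun st p =>
        p.2.foldl (fun st tool_name =>
          match st.1.get? tool_name with
          | some v => if v ≠ p.1 then (st.1, st.2 ++ [tool_name])
                      else (st.1.insert tool_name p.1, st.2)
          | none => (st.1.insert tool_name p.1, st.2)) st) (reg, dups)).2 = dups ∧
     (l.foldl (fun idx p =>
        p.2.foldl (fun idx tool_name =>
          idx.modify tool_name PySem.Set.empty (fun s => PySem.Set.add s p.1)) idx) idx).items =
       (l.foldl (fun st p =>
        p.2.foldl (fun st tool_name =>
          match st.1.get? tool_name with
          | some v => if v ≠ p.1 then (st.1, st.2 ++ [tool_name])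
                      else (st.1.insert tool_name p.1, st.2)
          | none => (st.1.insert tool_name p.1, st.2)) st) (reg, dups)).1.items.map (fun p => (p.1, ([p.2] : PySem.Set String)))) := by
  intro l
  induction l with
  | nil => intro _ reg dups idx hn hidx hR; exact ⟨rfl, hidx⟩
  | cons p rest ih =>
    intro hsub reg dups idx hn hidx hR
    obtain ⟨h2, hn', hidx', hR'⟩ := pv_inner L hPre p.1 p.2 (hsub p List.mem_cons_self)
      p.2 (fun t ht => ht) reg dups idx hn hidx hR
    simp only [List.foldl_cons]
    obtain ⟨H2, Hidx⟩ := ih (fun q hq => hsub q (List.mem_cons_of_mem _ hq)) _ _ _ hn' hidx' hR'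
    exact ⟨by rw [H2, h2], Hidx⟩

-- the second pass of B collapses on a singleton-valued index
theorem pv_final (xs : List (String × String)) :
    (if PySem.List.sorted (((xs.map (fun p => (p.1, ([p.2] : PySem.Set String)))).filter
          (fun q => decide (1 < q.2.length))).map (·.1)) (fun x => x) false ≠ [] then []
     else (xs.map (fun p => (p.1, ([p.2] : PySem.Set String)))).map
          (fun q => (q.1, (PySem.List.min? q.2 (fun x => x)).getD ""))) = xs := by
  have hf : (xs.map (fun p => (p.1, ([p.2] : PySem.Set String)))).filter
      (fun q => decide (1 < q.2.length)) = [] := by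
    rw [List.filter_map]
    have h0 : List.filter ((fun q : String × PySem.Set String => decide (1 < q.2.length)) ∘
        (fun p : String × String => (p.1, ([p.2] : PySem.Set String)))) xs = [] :=
      List.filter_eq_nil_iff.mpr (fun a _ => by simp [Function.comp])
    rw [h0]; rfl
  rw [hf]
  simp only [List.map_nil, ne_eq, List.map_map]
  exact (List.map_congr_left (fun p _ => rfl)).trans (List.map_id' _)

-- ===== VERDICT (by name: the statement is the Claim_ definition above) =====
theorem build_tool_registry_spec : Claim_equal_build_tool_registry := by
  intro L _ hPre
  show build_tool_registry L = build_tool_registry_alt L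
  obtain ⟨h2, hidx⟩ := pv_outer L hPre L (fun p hp => hp)
    PySem.Dict.empty [] PySem.Dict.empty PySem.Dict.nodup_keys_empty rfl (by intro q hq; cases hq)
  simp only [build_tool_registry, build_tool_registry_alt]
  rw [h2, hidx, pv_final]
  simp
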